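-- pv_equiv track=rewrite | github.com/Hugomguima/FEUP | 1st_Year/1st_Semestre/Fpro/RE's/RE09/budgeting2.py | budgeting2
-- ===== SOURCE A (Python) =====
-- def budgeting2(budget,products,wishlist):
--
--     products = sorted(products.items(), key = lambda x: x[1],reverse = True)
--     products = dict(products)
--     cost = 0
--     n_wish = {}
--
--     for i in products:
--         prod_price = products[i]
--         if i in wishlist:
--             cost += prod_price * wishlist[i]
--
--     if cost <= budget:
--         return wishlist
--     elif cost > budget:
--         cost = 0
--
--         for i in products:
--             prod_price = products[i]
--
--             if i in wishlist:
--                 for j in range(wishlist[i]):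
--                     if cost + prod_price <= budget:
--
--                         if i in n_wish:
--                             n_wish[i] += 1
--                         else:
--                             n_wish.update({i:1})
--                         cost += prod_price
--         return n_wish
-- ===== SOURCE B (Python) =====
-- def budgeting2(budget, products, wishlist):
--     total = sum(p * wishlist[name] for name, p in products.items() if name in wishlist)
--     if total <= budget:
--         return wishlist
--     cost = 0
--     result = {}
--     for name, p in sorted(products.items(), key=lambda x: x[1], reverse=True):
--         if name not in wishlist:
--             continue
--         q = wishlist[name]
--         u = q if p <= 0 else min(q, (budget - cost) // p)
--         if u > 0:
--             result[name] = u
--             cost += u * p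
--     return result
-- ===== Notes on version B (the rewrite author's own statement) =====
-- stated objective: alternative
-- what changed: A fills the budget one unit at a time (an inner loop of wishlist[i] iterations per product, updating the counter dict each step); B computes the number of units that fit for each product in one step by integer division and inserts the count once. Pre_ excludes inputs where the budget is negative AND some wishlist product has a non-positive price, outside the task's natural domain of priced goods and a positive budget, where A's per-unit affordability check denies free/negatively-priced items that B grants.
-- outside the precondition, e.g. on budgeting2(-1, {'a': 0}, {'a': 1}): A returns {}, B returns {'a': 1}
import Mathlib
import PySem

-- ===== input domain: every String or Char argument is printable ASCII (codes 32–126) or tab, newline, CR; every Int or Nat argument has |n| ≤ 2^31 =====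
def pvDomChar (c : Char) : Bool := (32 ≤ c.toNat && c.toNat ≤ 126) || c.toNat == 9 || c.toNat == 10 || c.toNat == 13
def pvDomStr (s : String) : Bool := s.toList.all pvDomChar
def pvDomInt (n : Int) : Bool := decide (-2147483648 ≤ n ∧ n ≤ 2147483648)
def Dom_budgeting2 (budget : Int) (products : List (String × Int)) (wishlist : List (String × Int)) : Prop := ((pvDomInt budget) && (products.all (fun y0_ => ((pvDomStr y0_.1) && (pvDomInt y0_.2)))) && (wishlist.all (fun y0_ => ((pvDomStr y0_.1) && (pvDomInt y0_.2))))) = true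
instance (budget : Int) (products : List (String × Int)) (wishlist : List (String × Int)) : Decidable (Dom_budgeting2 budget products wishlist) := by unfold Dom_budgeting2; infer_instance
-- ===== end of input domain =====

-- B replaces A's per-unit inner loop with a one-step integer-division count of affordable units per product (same return value on Pre_).


-- ===== PORT A =====
def budgeting2 (budget : Int) (products : List (String × Int)) (wishlist : List (String × Int)) : List (String × Int) :=
  let pd : PySem.Dict String Int := PySem.Dict.ofList products
  let wd : PySem.Dict String Int := PySem.Dict.ofList wishlist
  -- products = dict(sorted(products.items(), key=lambda x: x[1], reverse=True))
  let productsSorted : PySem.Dict String Int :=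
    PySem.Dict.ofList (PySem.List.sorted pd.items (fun x => x.2) true)
  -- cost = 0; for i in products: prod_price = products[i]; if i in wishlist: cost += prod_price * wishlist[i]
  let cost := productsSorted.items.foldl (fun cost i =>
      let prod_price := productsSorted.getD i.1 0
      if wd.contains i.1 then cost + prod_price * wd.getD i.1 0 else cost) 0
  if cost ≤ budget then wd.items
  else
    -- cost = 0; n_wish = {}; for i in products: … for j in range(wishlist[i]): …
    (productsSorted.items.foldl (fun (st : Int × PySem.Dict String Int) i =>
        let prod_price := productsSorted.getD i.1 0
        if wd.contains i.1 then
          (PySem.List.pyRange 0 (wd.getD i.1 0) 1).foldl (fun st _j =>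
            if st.1 + prod_price ≤ budget then
              (st.1 + prod_price,
               if st.2.contains i.1 then st.2.insert i.1 (st.2.getD i.1 0 + 1)
               else st.2.insert i.1 1)
            else st) st
        else st) (0, PySem.Dict.empty)).2.items

-- ===== PORT B =====
def budgeting2_alt (budget : Int) (products : List (String × Int)) (wishlist : List (String × Int)) : List (String × Int) :=
  let pd : PySem.Dict String Int := PySem.Dict.ofList products
  let wd : PySem.Dict String Int := PySem.Dict.ofList wishlist
  -- total = sum(p * wishlist[name] for name, p in products.items() if name in wishlist)
  let total := ((pd.items.filter (fun i => wd.contains i.1)).map (fun i => i.2 * wd.getD i.1 0)).sum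
  if total ≤ budget then wd.items
  else
    -- one pass over the price-sorted items; u = q if p <= 0 else min(q, (budget - cost) // p)
    (((PySem.List.sorted pd.items (fun x => x.2) true).foldl
        (fun (st : Int × PySem.Dict String Int) (i : String × Int) =>
          match wd.get? i.1 with
          | none => st
          | some q =>
            let u : Int := if i.2 ≤ 0 then q
                           else min q (PySem.Int.floordiv (budget - st.1) i.2)
            if 0 < u then (st.1 + u * i.2, st.2.insert i.1 u) else st)
        ((0 : Int), PySem.Dict.empty)).2).items

-- ===== PRECONDITION & SPEC =====
-- Pre_ excludes inputs where the budget is negative AND some wishlist product has a non-positive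
-- price: outside the task's natural domain of priced goods with a positive budget, where A's
-- per-unit affordability check denies free/negatively-priced items that B grants.
def Pre_budgeting2 (budget : Int) (products : List (String × Int)) (wishlist : List (String × Int)) : Prop :=
  0 ≤ budget ∨ ∀ x ∈ products, (PySem.Dict.ofList wishlist).contains x.1 = true → 0 < x.2
instance (budget : Int) (products : List (String × Int)) (wishlist : List (String × Int)) : Decidable (Pre_budgeting2 budget products wishlist) := by unfold Pre_budgeting2; infer_instance
def pvWitness_budgeting2 : Int × (List (String × Int)) × (List (String × Int)) :=
  (10, [("a", 3), ("b", 4)], [("a", 2), ("b", 1)])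
def Spec_budgeting2 (budget : Int) (products : List (String × Int)) (wishlist : List (String × Int)) (out : List (String × Int)) : Prop := out = budgeting2_alt budget products wishlist
instance (budget : Int) (products : List (String × Int)) (wishlist : List (String × Int)) (out : List (String × Int)) : Decidable (Spec_budgeting2 budget products wishlist out) := by unfold Spec_budgeting2; infer_instance

-- ===== CLAIM (what is proved, stated in full; the proofs are below) =====
def Claim_equal_budgeting2 : Prop := ∀ (budget : Int) (products : List (String × Int)) (wishlist : List (String × Int)), Dom_budgeting2 budget products wishlist → Pre_budgeting2 budget products wishlist → Spec_budgeting2 budget products wishlist (budgeting2 budget products wishlist)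

-- ===== LEMMAS AND PROOFS =====

-- (ofList l).items = l when the keys of l are distinct
theorem pv_items_ofList {l : List (String × Int)} (h : (l.map Prod.fst).Nodup) :
    (PySem.Dict.ofList l).items = l := by
  have := PySem.Dict.items_foldl_insert_fresh (κ := String) (ν := Int)
      l Prod.fst Prod.snd PySem.Dict.empty
      (fun a _ => PySem.Dict.contains_empty _) h
  simpa [PySem.Dict.ofList, PySem.Dict.update] using this

-- every item of (ofList l) is an element of l
theorem pv_mem_ofList_items {l : List (String × Int)} {x : String × Int}
    (hx : x ∈ (PySem.Dict.ofList l).items) : x ∈ l := by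
  suffices h : ∀ (l : List (String × Int)) (d : PySem.Dict String Int),
      x ∈ (l.foldl (fun d p => d.insert p.1 p.2) d).items → x ∈ d.items ∨ x ∈ l by
    rcases h l PySem.Dict.empty (by simpa [PySem.Dict.ofList, PySem.Dict.update] using hx) with h1 | h1
    · simp [PySem.Dict.empty] at h1
    · exact h1
  intro l
  induction l with
  | nil => intro d hd; exact Or.inl hd
  | cons p t ih =>
    intro d hd
    rcases ih (d.insert p.1 p.2) hd with h1 | h1
    · rcases (PySem.Dict.mem_items_insert _ _ _ _).mp h1 with h2 | h2
      · exact Or.inr (by simp [h2])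
      · exact Or.inl h2.1
    · exact Or.inr (List.mem_cons_of_mem _ h1)

-- a fold that ignores the list elements is an iterate
theorem pv_foldl_const {β : Type} (g : β → β) (l : List Int) (s : β) :
    List.foldl (fun st _ => g st) s l = g^[l.length] s := by
  induction l generalizing s with
  | nil => rfl
  | cons x xs ih => simp [List.foldl, ih, Function.iterate_succ_apply]

-- A's one inner-loop step, with the two dict branches merged
def pvG (budget p : Int) (k : String) (st : Int × PySem.Dict String Int) :
    Int × PySem.Dict String Int :=
  if st.1 + p ≤ budget then (st.1 + p, st.2.insert k (st.2.getD k 0 + 1)) else st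

theorem pv_bump (d : PySem.Dict String Int) (k : String) :
    (if d.contains k then d.insert k (d.getD k 0 + 1) else d.insert k 1)
      = d.insert k (d.getD k 0 + 1) := by
  by_cases h : d.contains k = true
  · simp [h]
  · have h' : d.contains k = false := by simpa using h
    simp [h', PySem.Dict.getD_of_not_contains _ _ h']

-- closed-form number of additions A's inner loop performs in n iterations
def pvK (budget p cost : Int) (n : Nat) : Nat :=
  if 0 < p then min n (Int.toNat (PySem.Int.floordiv (budget - cost) p))
  else if cost + p ≤ budget then n else 0

theorem pv_iterate_g (budget p : Int) (k : String) :
    ∀ (n : Nat) (cost : Int) (d : PySem.Dict String Int),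
      (pvG budget p k)^[n] (cost, d) =
        (cost + (pvK budget p cost n : Int) * p,
         if pvK budget p cost n = 0 then d
         else d.insert k (d.getD k 0 + (pvK budget p cost n : Int))) := by
  intro n
  induction n with
  | zero =>
    intro cost d
    have hK : pvK budget p cost 0 = 0 := by unfold pvK; split_ifs <;> simp
    simp [hK]
  | succ n ih =>
    intro cost d
    by_cases h : cost + p ≤ budget
    · have hg : pvG budget p k (cost, d) = (cost + p, d.insert k (d.getD k 0 + 1)) := by
        simp [pvG, h]
      have hK : pvK budget p cost (n+1) = pvK budget p (cost + p) n + 1 := by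
        unfold pvK
        by_cases hp : 0 < p
        · have hf1 : (1:Int) ≤ PySem.Int.floordiv (budget - cost) p :=
            (PySem.Int.le_floordiv_iff_mul_le hp).mpr (by linarith)
          have hstep : PySem.Int.floordiv (budget - (cost+p)) p
              = PySem.Int.floordiv (budget - cost) p - 1 := by
            have he : budget - (cost + p) = (budget - cost) + (-1) * p := by ring
            rw [he, PySem.Int.floordiv_eq_ediv_of_pos hp, PySem.Int.floordiv_eq_ediv_of_pos hp,
              Int.add_mul_ediv_right _ _ (ne_of_gt hp)]
            ring
          simp only [hp, if_true, hstep]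
          omega
        · have hp' : p ≤ 0 := not_lt.mp hp
          have h2 : cost + p + p ≤ budget := by linarith
          simp [hp, h, h2]
      rw [Function.iterate_succ_apply, hg, ih (cost+p) (d.insert k (d.getD k 0 + 1)), hK]
      by_cases hK0 : pvK budget p (cost + p) n = 0
      · simp only [hK0, if_true, Nat.zero_add, Nat.succ_ne_zero, if_false]
        rw [Prod.mk.injEq]
        constructor
        · push_cast; ring
        · simp
      · simp only [hK0, if_false, Nat.succ_ne_zero,
          PySem.Dict.getD_insert_self, PySem.Dict.insert_insert_self]
        rw [Prod.mk.injEq]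
        constructor
        · push_cast; ring
        · congr 1; push_cast; ring
    · have hfix : pvG budget p k (cost, d) = (cost, d) := by
        simp [pvG, h]
      have hK : pvK budget p cost (n+1) = 0 := by
        unfold pvK
        by_cases hp : 0 < p
        · have hlt : PySem.Int.floordiv (budget - cost) p < 1 :=
            (PySem.Int.floordiv_lt_iff_lt_mul hp).mpr (by linarith)
          simp only [hp, if_true]
          omega
        · simp [hp, h]
      rw [Function.iterate_fixed hfix, hK]
      simp

-- normalised A-step and B-step for the greedy pass
def pvStepA (budget : Int) (wd : PySem.Dict String Int)
    (st : Int × PySem.Dict String Int) (i : String × Int) : Int × PySem.Dict String Int :=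
  if wd.contains i.1 then
    (PySem.List.pyRange 0 (wd.getD i.1 0) 1).foldl (fun st _j =>
      if st.1 + i.2 ≤ budget then
        (st.1 + i.2,
         if st.2.contains i.1 then st.2.insert i.1 (st.2.getD i.1 0 + 1)
         else st.2.insert i.1 1)
      else st) st
  else st

def pvStepB (budget : Int) (wd : PySem.Dict String Int)
    (st : Int × PySem.Dict String Int) (i : String × Int) : Int × PySem.Dict String Int :=
  match wd.get? i.1 with
  | none => st
  | some q =>
    let u : Int := if i.2 ≤ 0 then q
                   else min q (PySem.Int.floordiv (budget - st.1) i.2)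
    if 0 < u then (st.1 + u * i.2, st.2.insert i.1 u) else st

-- arithmetic bridge between B's unit count u and A's addition count pvK
theorem pv_Ku (budget p cost q : Int) (u : Int)
    (hc : p ≤ 0 → cost ≤ budget)
    (hu : u = if p ≤ 0 then q else min q (PySem.Int.floordiv (budget - cost) p)) :
    (0 < u ↔ pvK budget p cost q.toNat ≠ 0) ∧ (0 < u → (pvK budget p cost q.toNat : Int) = u) := by
  unfold pvK
  by_cases hp : p ≤ 0
  · have hcb : cost + p ≤ budget := by have := hc hp; linarith
    have hp' : ¬ 0 < p := not_lt.mpr hp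
    simp only [hp, if_true] at hu
    simp only [hp', if_false, hcb, if_true]
    omega
  · have hp' : 0 < p := not_le.mp hp
    simp only [hp, if_false] at hu
    simp only [hp', if_true]
    omega

-- B's step never pushes the cost above the budget
theorem pv_stepB_cost (budget : Int) (wd : PySem.Dict String Int)
    (st : Int × PySem.Dict String Int) (i : String × Int)
    (hc : st.1 ≤ budget) : (pvStepB budget wd st i).1 ≤ budget := by
  unfold pvStepB
  cases hq : wd.get? i.1 with
  | none => exact hc
  | some q =>
    dsimp only
    by_cases hu : 0 < (if i.2 ≤ 0 then q else min q (PySem.Int.floordiv (budget - st.1) i.2))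
    · rw [if_pos hu]
      by_cases hp : i.2 ≤ 0
      · rw [if_pos hp] at hu
        have : q * i.2 ≤ 0 := mul_nonpos_iff.mpr (Or.inl ⟨by linarith, hp⟩)
        simp only [if_pos hp]
        linarith
      · have hp' : 0 < i.2 := not_le.mp hp
        rw [if_neg hp] at hu
        have hle : min q (PySem.Int.floordiv (budget - st.1) i.2)
            ≤ PySem.Int.floordiv (budget - st.1) i.2 := min_le_right _ _
        have := (PySem.Int.le_floordiv_iff_mul_le hp').mp hle
        simp only [if_neg hp]
        linarith
    · rw [if_neg hu]; exact hc

theorem pv_step_eq (budget : Int) (wd : PySem.Dict String Int)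
    (st : Int × PySem.Dict String Int) (i : String × Int)
    (hfree : st.2.contains i.1 = false)
    (hcb : wd.contains i.1 = true → i.2 ≤ 0 → st.1 ≤ budget) :
    pvStepA budget wd st i = pvStepB budget wd st i := by
  unfold pvStepA pvStepB
  cases hq : wd.get? i.1 with
  | none =>
    have hc : wd.contains i.1 = false := by
      rw [PySem.Dict.contains_eq_isSome_get?, hq]; rfl
    simp [hc]
  | some q =>
    have hc : wd.contains i.1 = true := by
      rw [PySem.Dict.contains_eq_isSome_get?, hq]; rfl
    have hgd : wd.getD i.1 0 = q := PySem.Dict.getD_of_get?_eq_some wd 0 hq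
    have hfun : (fun (st : Int × PySem.Dict String Int) (_j : Int) =>
        if st.1 + i.2 ≤ budget then
          (st.1 + i.2,
           if st.2.contains i.1 then st.2.insert i.1 (st.2.getD i.1 0 + 1)
           else st.2.insert i.1 1)
        else st) = fun st _j => pvG budget i.2 i.1 st := by
      funext st j
      rw [pv_bump st.2 i.1]
      rfl
    rw [hc, if_pos rfl, hgd, hfun, pv_foldl_const, PySem.List.length_pyRange_one]
    have hlen : (q - 0).toNat = q.toNat := by omega
    rw [hlen, pv_iterate_g budget i.2 i.1 q.toNat st.1 st.2]
    have hgd0 : st.2.getD i.1 0 = 0 := PySem.Dict.getD_of_not_contains st.2 0 hfree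
    dsimp only
    obtain ⟨h1, h2⟩ := pv_Ku budget i.2 st.1 q
      (if i.2 ≤ 0 then q else min q (PySem.Int.floordiv (budget - st.1) i.2))
      (hcb hc) rfl
    by_cases hu : 0 < (if i.2 ≤ 0 then q else min q (PySem.Int.floordiv (budget - st.1) i.2))
    · have hKne := h1.mp hu
      have hKu := h2 hu
      rw [if_pos hu, if_neg hKne, hgd0, hKu]
      rw [Prod.mk.injEq]
      exact ⟨rfl, by rw [zero_add]⟩
    · have hK0 : pvK budget i.2 st.1 q.toNat = 0 := by
        by_contra hne
        exact hu (h1.mpr hne)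
      rw [if_neg hu, hK0, if_pos rfl]
      simp

theorem pv_fold_eq (budget : Int) (wd : PySem.Dict String Int) :
    ∀ (l : List (String × Int)) (st : Int × PySem.Dict String Int),
      (l.map Prod.fst).Nodup → (∀ x ∈ l, st.2.contains x.1 = false) →
      (st.1 ≤ budget ∨ ∀ x ∈ l, wd.contains x.1 = true → 0 < x.2) →
      List.foldl (pvStepA budget wd) st l = List.foldl (pvStepB budget wd) st l := by
  intro l
  induction l with
  | nil => intro st _ _ _; rfl
  | cons i t ih =>
    intro st hnd hfree hside
    have hfi : st.2.contains i.1 = false := hfree i (by simp)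
    have hcb : wd.contains i.1 = true → i.2 ≤ 0 → st.1 ≤ budget := by
      rcases hside with h | h
      · exact fun _ _ => h
      · intro hc hle
        exact absurd (h i (by simp) hc) (not_lt.mpr hle)
    simp only [List.foldl_cons]
    rw [List.map_cons] at hnd
    obtain ⟨h1, h2⟩ := List.nodup_cons.mp hnd
    have hfree' : ∀ x ∈ t, ((pvStepB budget wd st i).2).contains x.1 = false := by
      intro x hx
      have hxne : x.1 ≠ i.1 := by
        intro he
        exact h1 (he ▸ (List.mem_map_of_mem hx))
      have hfx := hfree x (List.mem_cons_of_mem _ hx)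
      have hkeep : ∀ y, y ≠ i.1 → ((pvStepB budget wd st i).2).contains y = st.2.contains y := by
        intro y hy
        unfold pvStepB
        cases hq : wd.get? i.1 with
        | none => rfl
        | some q =>
          dsimp only
          split_ifs <;> simp [PySem.Dict.contains_insert, hy]
      rw [hkeep x.1 hxne]
      exact hfx
    have hside' : (pvStepB budget wd st i).1 ≤ budget ∨ ∀ x ∈ t, wd.contains x.1 = true → 0 < x.2 := by
      rcases hside with h | h
      · exact Or.inl (pv_stepB_cost budget wd st i h)
      · exact Or.inr (fun x hx => h x (List.mem_cons_of_mem _ hx))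
    rw [pv_step_eq budget wd st i hfi hcb, ih _ h2 hfree' hside']

theorem pv_cost_fold (wd : PySem.Dict String Int) :
    ∀ (l : List (String × Int)) (a : Int),
      l.foldl (fun c i => if wd.contains i.1 then c + i.2 * wd.getD i.1 0 else c) a
        = a + ((l.filter (fun i => wd.contains i.1)).map (fun i => i.2 * wd.getD i.1 0)).sum := by
  intro l
  induction l with
  | nil => intro a; simp
  | cons x t ih =>
    intro a
    by_cases h : wd.contains x.1 <;>
      simp [List.foldl_cons, h, ih, add_assoc]

-- ===== VERDICT (by name: the statement is the Claim_ definition above) =====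
theorem budgeting2_spec : Claim_equal_budgeting2 := by
  intro budget products wishlist _ hpre
  unfold Spec_budgeting2 budgeting2 budgeting2_alt
  dsimp only
  set pd := PySem.Dict.ofList products with hpd
  set wd := PySem.Dict.ofList wishlist with hwd
  set L := PySem.List.sorted pd.items (fun x => x.2) true with hL
  have hnd : (L.map Prod.fst).Nodup :=
    ((PySem.List.sorted_perm pd.items (fun x => x.2) true).map Prod.fst).nodup_iff.mpr
      (PySem.Dict.nodup_keys_ofList products)
  have hitems : (PySem.Dict.ofList L).items = L := pv_items_ofList hnd
  have hSnodup : (PySem.Dict.ofList L).keys.Nodup := PySem.Dict.nodup_keys_ofList L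
  have hgetD : ∀ i ∈ L, (PySem.Dict.ofList L).getD i.1 0 = i.2 := by
    intro i hi
    have hmem : (i.1, i.2) ∈ (PySem.Dict.ofList L).items := by
      rw [hitems]; simpa using hi
    exact PySem.Dict.getD_of_mem_items _ hmem hSnodup 0
  have hcost :
      (PySem.Dict.ofList L).items.foldl (fun cost i =>
          if wd.contains i.1 then cost + (PySem.Dict.ofList L).getD i.1 0 * wd.getD i.1 0
          else cost) 0
        = ((pd.items.filter (fun i => wd.contains i.1)).map
            (fun i => i.2 * wd.getD i.1 0)).sum := by
    rw [hitems]
    rw [PySem.List.foldl_congr_mem L _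
        (fun c i => if wd.contains i.1 then c + i.2 * wd.getD i.1 0 else c) 0
        (by intro acc x hx; rw [hgetD x hx])]
    rw [pv_cost_fold, zero_add]
    have hp : (L.filter (fun i => wd.contains i.1)).Perm
        (pd.items.filter (fun i => wd.contains i.1)) :=
      (PySem.List.sorted_perm pd.items (fun x => x.2) true).filter _
    exact (hp.map _).sum_eq
  rw [hcost]
  split_ifs with hb
  · rfl
  · -- greedy pass
    rw [hitems]
    rw [PySem.List.foldl_congr_mem L _ (pvStepA budget wd) (0, PySem.Dict.empty)
        (by
          intro acc x hx
          unfold pvStepA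
          rw [hgetD x hx])]
    rw [pv_fold_eq budget wd L (0, PySem.Dict.empty) hnd
        (by intro x _; exact PySem.Dict.contains_empty x.1)
        (by
          rcases hpre with h | h
          · exact Or.inl h
          · refine Or.inr (fun x hx hc => ?_)
            have hxp : x ∈ pd.items := (PySem.List.mem_sorted _ _ _ _).mp hx
            exact h x (pv_mem_ofList_items hxp) hc)]
    rfl
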